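-- pv_equiv track=rewrite | github.com/acin-rX/blockchain_task | pass_hash.py | hashof
-- ===== SOURCE A (Python) =====
-- def hashof(s) :
--     hash = 0
--     n = len(s)
--     for i in range(n) :
--         curr = ord(s[i])
--         for j in range(i+1, n) :
--             x = ord(s[j])
--             hash += (curr)*37 - (x % curr)*29
--     return hash
-- ===== SOURCE B (Python) =====
-- def hashof(s):
--     # One right-to-left pass: the linear 37*curr term uses the suffix length,
--     # and the modulo term is summed over a frequency table of suffix char codes.
--     total = 0
--     k = 0          # number of characters already seen (to the right)
--     counts = {}    # char code -> occurrences among the k seen characters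
--     for ch in reversed(s):
--         curr = ord(ch)
--         modsum = 0
--         for v, cnt in counts.items():
--             modsum += (v % curr) * cnt
--         total += 37 * curr * k - 29 * modsum
--         counts[curr] = counts.get(curr, 0) + 1
--         k += 1
--     return total
-- ===== Notes on version B (the rewrite author's own statement) =====
-- stated objective: faster
-- what changed: Replaces the nested all-pairs loop by a single right-to-left pass that maintains a frequency table of suffix char codes: the 37*curr part uses the suffix length and the modulo part is summed over distinct codes only.
import Mathlib
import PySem

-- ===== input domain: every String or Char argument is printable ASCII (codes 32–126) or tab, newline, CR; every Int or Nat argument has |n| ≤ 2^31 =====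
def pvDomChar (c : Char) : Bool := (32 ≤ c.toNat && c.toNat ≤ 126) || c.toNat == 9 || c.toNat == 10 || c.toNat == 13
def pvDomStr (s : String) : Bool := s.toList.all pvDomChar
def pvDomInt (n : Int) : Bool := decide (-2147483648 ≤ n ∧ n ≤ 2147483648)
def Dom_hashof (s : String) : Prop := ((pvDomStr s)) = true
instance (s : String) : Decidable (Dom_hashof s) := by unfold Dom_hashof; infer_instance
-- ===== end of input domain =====

-- B replaces A's nested all-pairs loop by one right-to-left pass with a frequency table of suffix char codes (measurably faster).

-- ===== PORT A =====
-- nested index loops: for i in range(n): for j in range(i+1, n): hash += curr*37 - (x % curr)*29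
def hashof (s : String) : Int :=
  let n : Int := PySem.Str.len s
  (PySem.List.pyRange 0 n 1).foldl (fun hash i =>
    let curr : Int := (PySem.List.pyGetD s.toList i ' ').toNat
    (PySem.List.pyRange (i + 1) n 1).foldl (fun hash j =>
      let x : Int := (PySem.List.pyGetD s.toList j ' ').toNat
      hash + (curr * 37 - (PySem.Int.mod x curr) * 29)) hash) 0

-- ===== PORT B =====
-- one pass over reversed(s) with state (total, k, counts); dict iteration ported as a fold over items
def hashof_alt (s : String) : Int :=
  let codes := s.toList.map (fun ch => (ch.toNat : Int))
  let st := codes.reverse.foldl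
    (fun (st : Int × Int × PySem.Dict Int Int) curr =>
      let total := st.1
      let k := st.2.1
      let counts := st.2.2
      let modsum := counts.items.foldl (fun m p => m + (PySem.Int.mod p.1 curr) * p.2) 0
      (total + 37 * curr * k - 29 * modsum, k + 1, counts.insert curr (counts.getD curr 0 + 1)))
    (0, 0, PySem.Dict.empty)
  st.1

-- ===== PRECONDITION & SPEC =====
def Spec_hashof (s : String) (out : Int) : Prop := out = hashof_alt s
instance (s : String) (out : Int) : Decidable (Spec_hashof s out) := by unfold Spec_hashof; infer_instance

-- ===== CLAIM (what is proved, stated in full; the proofs are below) =====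
def Claim_equal_hashof : Prop := ∀ (s : String), Dom_hashof s → Spec_hashof s (hashof s)

-- ===== LEMMAS AND PROOFS =====

def pvOrd (ch : Char) : Int := (ch.toNat : Int)

-- the common mathematical value: sum of A's summand over all strict-suffix pairs
def pvF : List Int → Int
  | [] => 0
  | c :: rest => (rest.map (fun x => c * 37 - (PySem.Int.mod x c) * 29)).sum + pvF rest

-- B's loop body, named for the proofs (definitionally the lambda in hashof_alt)
def pvStep (st : Int × Int × PySem.Dict Int Int) (curr : Int) : Int × Int × PySem.Dict Int Int :=
  let total := st.1
  let k := st.2.1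
  let counts := st.2.2
  let modsum := counts.items.foldl (fun m p => m + (PySem.Int.mod p.1 curr) * p.2) 0
  (total + 37 * curr * k - 29 * modsum, k + 1, counts.insert curr (counts.getD curr 0 + 1))

theorem pv_sum_ite_nodup (f : Int → Int) (D : List Int) (x : Int)
    (hD : D.Nodup) (hx : x ∈ D) :
    (D.map (fun k => if k = x then f k else 0)).sum = f x := by
  induction D with
  | nil => cases hx
  | cons y D ih =>
    rcases List.mem_cons.1 hx with h | h
    · subst h
      have hnot : ∀ k ∈ D, ¬ (k = x) := fun k hk he => ((List.nodup_cons.1 hD).1 (he ▸ hk))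
      have hz : (D.map (fun k => if k = x then f k else 0)).sum = 0 := by
        rw [List.sum_eq_zero]
        intro z hzz
        rcases List.mem_map.1 hzz with ⟨k, hk, hkz⟩
        rw [if_neg (hnot k hk)] at hkz
        exact hkz.symm
      simp [hz]
    · have hyx : ¬ (y = x) := fun he => ((List.nodup_cons.1 hD).1 (he ▸ h))
      simp only [List.map_cons, List.sum_cons, if_neg hyx]
      rw [ih (List.nodup_cons.1 hD).2 h]
      omega

theorem pv_wsum (f : Int → Int) (N : List Int) (D : List Int)
    (hD : D.Nodup) (hmem : ∀ x ∈ N, x ∈ D) :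
    (D.map (fun k => f k * (N.count k : Int))).sum = (N.map f).sum := by
  induction N with
  | nil => simp
  | cons x N ih =>
    have hsplit : ∀ k : Int, f k * ((x :: N).count k : Int)
        = f k * (N.count k : Int) + (if k = x then f k else 0) := by
      intro k
      rw [List.count_cons]
      by_cases h : x = k
      · subst h; simp; ring
      · rw [if_neg (by simpa using h), if_neg (fun he => h he.symm)]
        push_cast; ring
    calc (D.map (fun k => f k * ((x :: N).count k : Int))).sum
        = (D.map (fun k => f k * (N.count k : Int) + (if k = x then f k else 0))).sum := by
          congr 1; exact List.map_congr_left (fun k _ => hsplit k)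
      _ = (D.map (fun k => f k * (N.count k : Int))).sum
            + (D.map (fun k => if k = x then f k else 0)).sum := by
          rw [← List.sum_map_add]
      _ = (N.map f).sum + f x := by
          rw [ih (fun z hz => hmem z (List.mem_cons_of_mem x hz)),
            pv_sum_ite_nodup f D x hD (hmem x List.mem_cons_self)]
      _ = ((x :: N).map f).sum := by simp [List.map_cons]; omega

theorem pv_msum_counter (N : List Int) (c : Int) :
    ((PySem.Dict.counter N).items.map (fun p => (PySem.Int.mod p.1 c) * p.2)).sum
      = (N.map (fun x => PySem.Int.mod x c)).sum := by
  rw [PySem.Dict.items_counter, List.map_map]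
  have : ((fun p : Int × Int => (PySem.Int.mod p.1 c) * p.2) ∘ (fun k => (k, (N.count k : Int))))
      = fun k => (fun x => PySem.Int.mod x c) k * (N.count k : Int) := rfl
  rw [this]
  exact pv_wsum (fun x => PySem.Int.mod x c) N _ (PySem.Set.nodup_ofList N)
    (fun x hx => (PySem.Set.mem_ofList N x).2 hx)

theorem pv_sum_term (c : Int) (l : List Int) :
    (l.map (fun x => c * 37 - (PySem.Int.mod x c) * 29)).sum
      = 37 * c * l.length - 29 * (l.map (fun x => PySem.Int.mod x c)).sum := by
  induction l with
  | nil => simp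
  | cons x l ih =>
    simp only [List.map_cons, List.sum_cons, List.length_cons, ih]
    push_cast; ring

theorem pv_foldB (L : List Int) :
    L.reverse.foldl pvStep (0, 0, PySem.Dict.empty)
      = (pvF L, (L.length : Int), PySem.Dict.counter L.reverse) := by
  induction L with
  | nil => rfl
  | cons c rest ih =>
    rw [List.reverse_cons, List.foldl_append, ih]
    show pvStep (pvF rest, (rest.length : Int), PySem.Dict.counter rest.reverse) c = _
    unfold pvStep
    simp only []
    refine Prod.ext ?_ (Prod.ext ?_ ?_)
    · show pvF rest + 37 * c * (rest.length : Int)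
          - 29 * ((PySem.Dict.counter rest.reverse).items.foldl
              (fun m p => m + (PySem.Int.mod p.1 c) * p.2) 0) = pvF (c :: rest)
      rw [PySem.List.foldl_add (PySem.Dict.counter rest.reverse).items
        (fun p : Int × Int => (PySem.Int.mod p.1 c) * p.2) 0, zero_add,
        pv_msum_counter, List.map_reverse, List.sum_reverse]
      show _ = (rest.map (fun x => c * 37 - (PySem.Int.mod x c) * 29)).sum + pvF rest
      rw [pv_sum_term]
      ring
    · show (rest.length : Int) + 1 = ((c :: rest).length : Int)
      push_cast [List.length_cons]; ring
    · show (PySem.Dict.counter rest.reverse).insert c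
          ((PySem.Dict.counter rest.reverse).getD c 0 + 1)
          = PySem.Dict.counter (rest.reverse ++ [c])
      rw [PySem.Dict.counter_append_singleton]
      rfl

theorem hashof_alt_eq_pvF (s : String) :
    hashof_alt s = pvF (s.toList.map pvOrd) := by
  show ((s.toList.map pvOrd).reverse.foldl pvStep (0, 0, PySem.Dict.empty)).1 = _
  rw [pv_foldB]

theorem pv_foldA (cs : List Char) (d : Nat) : ∀ (a : Nat) (acc : Int), a + d = cs.length →
    (PySem.List.pyRange (a : Int) (cs.length : Int)).foldl
      (fun hash i =>
        let curr : Int := (PySem.List.pyGetD cs i ' ').toNat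
        (PySem.List.pyRange (i + 1) (cs.length : Int)).foldl (fun hash j =>
          let x : Int := (PySem.List.pyGetD cs j ' ').toNat
          hash + (curr * 37 - (PySem.Int.mod x curr) * 29)) hash) acc
      = acc + pvF ((cs.drop a).map pvOrd) := by
  induction d with
  | zero =>
    intro a acc h
    rw [PySem.List.pyRange_one_eq_nil (by omega), List.foldl_nil,
      List.drop_of_length_le (by omega)]
    simp [pvF]
  | succ d ih =>
    intro a acc h
    have ha : a < cs.length := by omega
    rw [PySem.List.pyRange_one_cons (by exact_mod_cast ha), List.foldl_cons]
    simp only [PySem.List.pyGetD_natCast, List.getD_eq_getElem cs ' ' ha]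
    set curr : Int := (cs[a].toNat : Int) with hcurr
    have hcast : ((a : Int) + 1) = ((a + 1 : Nat) : Int) := by push_cast; ring
    rw [hcast,
      PySem.List.foldl_pyRange_pyGetD' cs ' '
        (fun hash ch => hash + (curr * 37 - (PySem.Int.mod (ch.toNat : Int) curr) * 29)) acc
        (by positivity),
      Int.toNat_natCast,
      PySem.List.foldl_add (List.drop (a + 1) cs)
        (fun ch : Char => curr * 37 - (PySem.Int.mod ((ch.toNat : Nat) : Int) curr) * 29) acc,
      ih (a + 1) _ (by omega),
      List.drop_eq_getElem_cons ha]
    simp only [List.map_cons, pvF, List.map_map]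
    show acc + _ + _ = acc + (_ + _)
    have : ((fun x => pvOrd cs[a] * 37 - PySem.Int.mod x (pvOrd cs[a]) * 29) ∘ pvOrd)
        = fun ch => curr * 37 - (PySem.Int.mod (ch.toNat : Int) curr) * 29 := rfl
    rw [this]
    ring

theorem hashof_eq_pvF (s : String) :
    hashof s = pvF (s.toList.map pvOrd) := by
  show (PySem.List.pyRange 0 (PySem.Str.len s) 1).foldl _ 0 = _
  rw [PySem.Str.len_eq]
  have h := pv_foldA s.toList s.toList.length 0 0 (by omega)
  rw [List.drop_zero, zero_add] at h
  simpa using h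

-- ===== VERDICT (by name: the statement is the Claim_ definition above) =====
theorem hashof_spec : Claim_equal_hashof := by
  intro s _
  unfold Spec_hashof
  rw [hashof_eq_pvF, hashof_alt_eq_pvF]
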